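-- pv_equiv track=rewrite | github.com/PetarKachev/SoftUni-courses | Programming Advanced EXAMS/EXAM_18/list_pureness.py | best_list_pureness
-- ===== SOURCE A (Python) =====
-- def best_list_pureness(*args):
--     import sys
--     max_num = -sys.maxsize
--     max_rotation = 0
--     from collections import deque
--     current_list = args[0]
--     k = int(args[1])
--     rotations = 0
--
--     while rotations <= k:
--         current_sum = 0
--         for index in range(len(current_list)):
--             current_sum += current_list[index] * index
--         if current_sum > max_num:
--             max_num = current_sum
--             max_rotation = rotations
--         rotations += 1
--
--         current_list = deque(current_list)
--         current_list.insert(0, current_list.pop())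
--
--     return f"Best pureness {max_num} after {max_rotation} rotations"
-- ===== SOURCE B (Python) =====
-- def best_list_pureness(numbers, k):
--     n = len(numbers)
--     total = sum(numbers)
--     s = sum(i * x for i, x in enumerate(numbers))
--     best, best_rot = -(2**63 - 1), 0  # same initial maximum as A's -sys.maxsize (64-bit)
--     for r in range(k + 1):
--         if r:
--             s += total - n * numbers[(n - r) % n]
--         if s > best:
--             best, best_rot = s, r
--     return f"Best pureness {best} after {best_rot} rotations"
-- ===== Notes on version B (the rewrite author's own statement) =====
-- stated objective: faster
-- what changed: A rebuilds the rotated list and recomputes the weighted-index sum from scratch for each of the k+1 rotations (O(k*n)); B computes the initial weighted sum once and updates it in O(1) per rotation via s += total - n*numbers[(n-r)%n], indexing the popped element directly in the original list (O(n+k)).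
import Mathlib
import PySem

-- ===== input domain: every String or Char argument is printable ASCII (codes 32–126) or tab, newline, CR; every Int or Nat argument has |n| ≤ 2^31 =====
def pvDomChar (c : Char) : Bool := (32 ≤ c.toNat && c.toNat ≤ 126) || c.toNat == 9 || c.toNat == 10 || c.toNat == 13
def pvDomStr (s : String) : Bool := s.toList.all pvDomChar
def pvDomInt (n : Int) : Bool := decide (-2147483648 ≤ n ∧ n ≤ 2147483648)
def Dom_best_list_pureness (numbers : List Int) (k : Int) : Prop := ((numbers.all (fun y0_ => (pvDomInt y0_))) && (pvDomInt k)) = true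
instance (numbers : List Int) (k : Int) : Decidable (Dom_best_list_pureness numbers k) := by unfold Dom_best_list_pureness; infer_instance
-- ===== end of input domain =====

-- B replaces A's per-rotation O(n) recomputation of the weighted-index sum over a rebuilt
-- rotated list by a single initial sum updated in O(1) per rotation (s += total - n*last).

-- ===== PORT A =====
-- the inner 'for index in range(len(current_list)): current_sum += current_list[index] * index'
def bplA_sum (cur : List Int) : Int :=
  (PySem.List.pyRange 0 (cur.length : Int) 1).foldl
    (fun s idx => s + PySem.List.pyGetD cur idx 0 * idx) 0

-- the 'while rotations <= k' loop; fuel = number of remaining iterations, (k+1).toNat at entry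
def bplA_loop (k : Int) : Nat → List Int → Int → Int → Int → Int × Int
  | 0, _, _, mN, mR => (mN, mR)
  | fuel + 1, cur, rot, mN, mR =>
    let s := bplA_sum cur
    let p := if s > mN then (s, rot) else (mN, mR)
    match cur.getLast? with
    | none => p   -- 'current_list.pop()' raises IndexError on the empty deque (outside Pre_)
    | some x => bplA_loop k fuel (x :: cur.dropLast) (rot + 1) p.1 p.2

def best_list_pureness (numbers : List Int) (k : Int) : String :=
  let res := bplA_loop k (k + 1).toNat numbers 0 (-9223372036854775807) 0
  "Best pureness " ++ PySem.Int.toStr res.1 ++ " after " ++ PySem.Int.toStr res.2 ++ " rotations"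

-- ===== PORT B =====
-- body of 'for r in range(k+1)': state (s, best, best_rot)
def bplB_step (numbers : List Int) (total : Int) (st : Int × Int × Int) (r : Int) : Int × Int × Int :=
  let s := if r ≠ 0 then
      st.1 + total - (numbers.length : Int) *
        PySem.List.pyGetD numbers (PySem.Int.mod ((numbers.length : Int) - r) (numbers.length : Int)) 0
    else st.1
  if s > st.2.1 then (s, s, r) else (s, st.2.1, st.2.2)

def best_list_pureness_alt (numbers : List Int) (k : Int) : String :=
  let total := numbers.foldl (· + ·) 0
  let s0 := ((PySem.List.enumerate numbers 0).map (fun p => p.1 * p.2)).foldl (· + ·) 0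
  let res := (PySem.List.pyRange 0 (k + 1) 1).foldl (bplB_step numbers total)
      (s0, -9223372036854775807, 0)
  "Best pureness " ++ PySem.Int.toStr res.2.1 ++ " after " ++ PySem.Int.toStr res.2.2 ++ " rotations"

-- ===== PRECONDITION & SPEC =====
-- Pre_ excludes exactly the inputs on which A raises: an empty list with k ≥ 0, where
-- 'current_list.pop()' raises IndexError on the empty deque.
def Pre_best_list_pureness (numbers : List Int) (k : Int) : Prop := numbers ≠ [] ∨ k < 0
instance (numbers : List Int) (k : Int) : Decidable (Pre_best_list_pureness numbers k) := by unfold Pre_best_list_pureness; infer_instance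
def pvWitness_best_list_pureness : List Int × Int := ([1, 2, 3], 2)

def Spec_best_list_pureness (numbers : List Int) (k : Int) (out : String) : Prop := out = best_list_pureness_alt numbers k
instance (numbers : List Int) (k : Int) (out : String) : Decidable (Spec_best_list_pureness numbers k out) := by unfold Spec_best_list_pureness; infer_instance

-- ===== CLAIM (what is proved, stated in full; the proofs are below) =====
def Claim_equal_best_list_pureness : Prop := ∀ (numbers : List Int) (k : Int), Dom_best_list_pureness numbers k → Pre_best_list_pureness numbers k → Spec_best_list_pureness numbers k (best_list_pureness numbers k)

-- ===== LEMMAS AND PROOFS =====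

def pvWsum : List Int → Int
  | [] => 0
  | _ :: t => t.sum + pvWsum t

theorem pvWsum_append_singleton (ys : List Int) (x : Int) :
    pvWsum (ys ++ [x]) = pvWsum ys + (ys.length : Int) * x := by
  induction ys with
  | nil => simp [pvWsum]
  | cons y t ih => simp [pvWsum, ih]; ring

theorem pvWsum_rr (l : List Int) (x : Int) (h : l.getLast? = some x) :
    pvWsum (x :: l.dropLast) = pvWsum l + l.sum - (l.length : Int) * x := by
  rcases (l.eq_nil_or_concat) with rfl | ⟨ys, y, rfl⟩
  · simp at h
  · simp only [List.concat_eq_append] at *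
    rw [List.getLast?_concat] at h
    cases h
    simp [pvWsum, pvWsum_append_singleton]
    ring

def pvRR (l : List Int) : List Int :=
  match l.getLast? with
  | none => l
  | some x => x :: l.dropLast

theorem pvRR_eq_rotate (l : List Int) (h : l ≠ []) :
    pvRR l = l.rotate (l.length - 1) := by
  rcases (l.eq_nil_or_concat) with rfl | ⟨ys, y, rfl⟩
  · simp at h
  · simp only [List.concat_eq_append] at *
    unfold pvRR
    rw [List.getLast?_concat]
    rw [List.rotate_eq_drop_append_take (by simp)]
    simp

theorem pvRR_iter_eq_rotate (L : List Int) (h : L ≠ []) (m : Nat) :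
    pvRR^[m] L = L.rotate (m * (L.length - 1) % L.length) := by
  induction m with
  | zero => simp
  | succ m ih =>
    rw [Function.iterate_succ_apply', ih]
    have hne : L.rotate (m * (L.length - 1) % L.length) ≠ [] := by
      simp [List.rotate_eq_nil_iff, h]
    rw [pvRR_eq_rotate _ hne, List.length_rotate, List.rotate_rotate]
    rw [← List.rotate_mod L (m * (L.length - 1) % L.length + (L.length - 1))]
    congr 1
    have h1 : m * (L.length - 1) % L.length + (L.length - 1) ≡ (m + 1) * (L.length - 1) [MOD L.length] := by
      calc m * (L.length - 1) % L.length + (L.length - 1)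
          ≡ m * (L.length - 1) + (L.length - 1) [MOD L.length] :=
            Nat.ModEq.add_right _ (Nat.mod_modEq _ _)
        _ = (m + 1) * (L.length - 1) := by ring
    exact h1

theorem pv_getLast?_rotate (L : List Int) (h : L ≠ []) (t : Nat) (ht : t < L.length) :
    (L.rotate t).getLast? = L[(t + L.length - 1) % L.length]? := by
  have hn : 0 < L.length := List.length_pos_iff.mpr h
  rw [List.rotate_eq_drop_append_take (Nat.le_of_lt ht)]
  rcases Nat.eq_zero_or_pos t with rfl | htpos
  · simp [List.getLast?_eq_getElem?]
  · rw [List.getLast?_append]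
    have hmod : (t + L.length - 1) % L.length = t - 1 := by
      have h2 : t + L.length - 1 = (t - 1) + L.length := by omega
      rw [h2, Nat.add_mod_right, Nat.mod_eq_of_lt (by omega)]
    have htake : (List.take t L).getLast? = L[(t + L.length - 1) % L.length]? := by
      rw [List.getLast?_eq_getElem?]
      rw [List.length_take, Nat.min_eq_left (Nat.le_of_lt ht)]
      rw [List.getElem?_take, if_pos (by omega), hmod]
    rw [htake]
    have : L[(t + L.length - 1) % L.length]?.isSome := by
      simp [List.getElem?_eq_getElem (Nat.mod_lt _ hn)]
    cases hv : L[(t + L.length - 1) % L.length]? with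
    | none => rw [hv] at this; simp at this
    | some v => simp

theorem pv_getLast?_iter (L : List Int) (h : L ≠ []) (m : Nat) :
    (pvRR^[m] L).getLast? = L[((m + 1) * (L.length - 1)) % L.length]? := by
  have hn : 0 < L.length := List.length_pos_iff.mpr h
  rw [pvRR_iter_eq_rotate L h m]
  rw [pv_getLast?_rotate L h _ (Nat.mod_lt _ hn)]
  congr 1
  have h1 : m * (L.length - 1) % L.length + L.length - 1 ≡ (m + 1) * (L.length - 1) [MOD L.length] := by
    have := Nat.mod_modEq (m * (L.length - 1)) L.length
    calc m * (L.length - 1) % L.length + L.length - 1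
        = m * (L.length - 1) % L.length + (L.length - 1) := by omega
      _ ≡ m * (L.length - 1) + (L.length - 1) [MOD L.length] :=
          Nat.ModEq.add_right _ (Nat.mod_modEq _ _)
      _ = (m + 1) * (L.length - 1) := by ring
  exact h1

theorem pv_b_index (L : List Int) (h : L ≠ []) (m : Nat) :
    PySem.Int.mod ((L.length : Int) - ((m : Int) + 1)) (L.length : Int)
      = (((m + 1) * (L.length - 1) % L.length : Nat) : Int) := by
  have hn : 0 < L.length := List.length_pos_iff.mpr h
  obtain ⟨d, hd⟩ : ∃ d, L.length = d + 1 := ⟨L.length - 1, by omega⟩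
  rw [PySem.Int.mod_eq_emod_of_pos (by exact_mod_cast hn)]
  rw [hd]
  push_cast
  rw [Int.emod_eq_emod_iff_emod_sub_eq_zero]
  have : ((d:Int) + 1 - ((m:Int) + 1)) - ((m:Int) + 1) * d = ((d:Int) + 1) * (-(m:Int)) := by ring
  rw [this]
  exact Int.mul_emod_right _ _

theorem pvA_sum_from (cur : List Int) :
    ∀ (d i : Nat) (acc : Int), i + d = cur.length →
      (PySem.List.pyRange (i : Int) (cur.length : Int) 1).foldl
          (fun s idx => s + PySem.List.pyGetD cur idx 0 * idx) acc
        = acc + pvWsum (cur.drop i) + (i : Int) * (cur.drop i).sum := by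
  intro d
  induction d with
  | zero =>
    intro i acc hi
    rw [PySem.List.pyRange_one_eq_nil (by omega)]
    have hdrop : List.drop i cur = [] := List.drop_eq_nil_of_le (by omega)
    simp [hdrop, pvWsum]
  | succ d ih =>
    intro i acc hi
    have hilt : i < cur.length := by omega
    rw [PySem.List.pyRange_one_cons (by exact_mod_cast hilt)]
    simp only [List.foldl_cons]
    have hcast : (i : Int) + 1 = ((i + 1 : Nat) : Int) := by push_cast; ring
    rw [hcast, ih (i + 1) _ (by omega)]
    rw [PySem.List.pyGetD_natCast, List.getD_eq_getElem _ _ hilt]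
    rw [← List.getElem_cons_drop hilt]
    simp only [pvWsum, List.sum_cons]
    push_cast
    ring

theorem pvA_sum_eq (cur : List Int) : bplA_sum cur = pvWsum cur := by
  have := pvA_sum_from cur cur.length 0 0 (by omega)
  simpa [bplA_sum] using this

theorem pv_enum_sum (xs : List Int) :
    ∀ (s0 acc : Int),
      ((PySem.List.enumerate xs s0).map (fun p => p.1 * p.2)).foldl (· + ·) acc
        = acc + pvWsum xs + s0 * xs.sum := by
  induction xs with
  | nil => intro s0 acc; simp [PySem.List.enumerate, pvWsum]
  | cons x t ih =>
    intro s0 acc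
    rw [PySem.List.enumerate_cons]
    simp only [List.map_cons, List.foldl_cons]
    rw [ih]
    simp only [pvWsum, List.sum_cons]
    ring

theorem pv_iter_ne_nil (L : List Int) (h : L ≠ []) (m : Nat) : pvRR^[m] L ≠ [] := by
  rw [pvRR_iter_eq_rotate L h m]
  simp [List.rotate_eq_nil_iff, h]

theorem pv_iter_length (L : List Int) (h : L ≠ []) (m : Nat) : (pvRR^[m] L).length = L.length := by
  rw [pvRR_iter_eq_rotate L h m, List.length_rotate]

theorem pv_iter_sum (L : List Int) (h : L ≠ []) (m : Nat) : (pvRR^[m] L).sum = L.sum := by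
  rw [pvRR_iter_eq_rotate L h m]
  exact (List.rotate_perm L _).sum_eq

theorem pv_iter_succ_of_getLast (L : List Int) (m : Nat) (x : Int)
    (hlast : (pvRR^[m] L).getLast? = some x) :
    pvRR^[m + 1] L = x :: (pvRR^[m] L).dropLast := by
  rw [Function.iterate_succ_apply']
  generalize hgen : pvRR^[m] L = l' at hlast ⊢
  unfold pvRR
  rw [hlast]

theorem pv_s_step (L : List Int) (h : L ≠ []) (j : Nat) :
    pvWsum (pvRR^[j] L) + L.sum - (L.length : Int) *
        PySem.List.pyGetD L (PySem.Int.mod ((L.length : Int) - ((j : Int) + 1)) (L.length : Int)) 0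
      = pvWsum (pvRR^[j + 1] L) := by
  have hn : 0 < L.length := List.length_pos_iff.mpr h
  have hidx : (j + 1) * (L.length - 1) % L.length < L.length := Nat.mod_lt _ hn
  rw [pv_b_index L h j, PySem.List.pyGetD_natCast, List.getD_eq_getElem _ _ hidx]
  have hlast : (pvRR^[j] L).getLast? = some (L[(j + 1) * (L.length - 1) % L.length]) := by
    rw [pv_getLast?_iter L h j]
    exact List.getElem?_eq_getElem hidx
  rw [pv_iter_succ_of_getLast L j _ hlast]
  rw [pvWsum_rr _ _ hlast, pv_iter_sum L h j, pv_iter_length L h j]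

theorem pv_loop_eq (L : List Int) (hL : L ≠ []) (k : Int) :
    ∀ (fuel m : Nat) (mN mR : Int),
      (fuel : Int) = k + 1 - (m : Int) →
      bplA_loop k fuel (pvRR^[m] L) (m : Int) mN mR
        = ((PySem.List.pyRange (m : Int) (k + 1) 1).foldl (bplB_step L L.sum)
            (pvWsum (pvRR^[m - 1] L), mN, mR)).2 := by
  intro fuel
  induction fuel with
  | zero =>
    intro m mN mR hf
    rw [PySem.List.pyRange_one_eq_nil (by omega)]
    simp [bplA_loop]
  | succ fuel ih =>
    intro m mN mR hf
    have hmk : (m : Int) < k + 1 := by omega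
    rw [PySem.List.pyRange_one_cons hmk]
    simp only [List.foldl_cons]
    -- the value B's step computes equals A's recomputed weighted sum
    have hs : (if (m : Int) ≠ 0 then
          pvWsum (pvRR^[m - 1] L) + L.sum - (L.length : Int) *
            PySem.List.pyGetD L (PySem.Int.mod ((L.length : Int) - (m : Int)) (L.length : Int)) 0
        else pvWsum (pvRR^[m - 1] L)) = pvWsum (pvRR^[m] L) := by
      cases m with
      | zero => simp
      | succ j =>
        rw [if_pos (by exact_mod_cast Nat.succ_ne_zero j)]
        have hc : ((j + 1 : Nat) : Int) = (j : Int) + 1 := by push_cast; ring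
        rw [Nat.add_sub_cancel, hc, pv_s_step L hL j]
    have hlast' : (pvRR^[m] L).getLast?.isSome := by
      rcases List.exists_mem_of_ne_nil _ (pv_iter_ne_nil L hL m) with _
      cases hl : (pvRR^[m] L).getLast? with
      | none => exact absurd (List.getLast?_eq_none_iff.mp hl) (pv_iter_ne_nil L hL m)
      | some x => rfl
    cases hl : (pvRR^[m] L).getLast? with
    | none => rw [hl] at hlast'; simp at hlast'
    | some x =>
      -- unfold one step of A's loop
      show (let s := bplA_sum (pvRR^[m] L);
            let p := if s > mN then (s, (m : Int)) else (mN, mR);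
            match (pvRR^[m] L).getLast? with
            | none => p
            | some x => bplA_loop k fuel (x :: (pvRR^[m] L).dropLast) ((m : Int) + 1) p.1 p.2) = _
      rw [hl]
      simp only [pvA_sum_eq]
      have hstep : bplB_step L L.sum (pvWsum (pvRR^[m - 1] L), mN, mR) (m : Int)
          = (pvWsum (pvRR^[m] L),
             if pvWsum (pvRR^[m] L) > mN then (pvWsum (pvRR^[m] L), (m : Int)) else (mN, mR)) := by
        unfold bplB_step
        simp only []
        rw [hs]
        split_ifs <;> rfl
      rw [hstep]
      have hnext : x :: (pvRR^[m] L).dropLast = pvRR^[m + 1] L :=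
        (pv_iter_succ_of_getLast L m x hl).symm
      have hcast : (m : Int) + 1 = ((m + 1 : Nat) : Int) := by push_cast; ring
      by_cases hcmp : pvWsum (pvRR^[m] L) > mN
      · rw [if_pos hcmp]
        simp only [hnext, hcast]
        rw [ih (m + 1) _ _ (by omega)]
        simp
      · rw [if_neg hcmp]
        simp only [hnext, hcast]
        rw [ih (m + 1) _ _ (by omega)]
        simp

theorem pv_main (numbers : List Int) (k : Int) (hpre : numbers ≠ [] ∨ k < 0) :
    best_list_pureness numbers k = best_list_pureness_alt numbers k := by
  unfold best_list_pureness best_list_pureness_alt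
  by_cases hk : k < 0
  · rw [Int.toNat_of_nonpos (by omega), PySem.List.pyRange_one_eq_nil (by omega)]
    simp [bplA_loop]
  · have hne : numbers ≠ [] := by
      rcases hpre with h | h
      · exact h
      · omega
    have hs0 : ((PySem.List.enumerate numbers 0).map (fun p => p.1 * p.2)).foldl (· + ·) 0
        = pvWsum numbers := by
      rw [pv_enum_sum]; ring
    have htot : numbers.foldl (· + ·) 0 = numbers.sum := List.sum_eq_foldl.symm
    have := pv_loop_eq numbers hne k (k + 1).toNat 0 (-9223372036854775807) 0
      (by rw [Int.toNat_of_nonneg (by omega)]; push_cast; ring)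
    simp only [Function.iterate_zero_apply, Nat.cast_zero, Nat.zero_sub] at this
    rw [this, hs0, htot]

theorem best_list_pureness_spec : Claim_equal_best_list_pureness := by
  intro numbers k _ hpre
  unfold Spec_best_list_pureness
  exact pv_main numbers k hpre
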